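-- pv_equiv track=rewrite | github.com/reinaldiragasa/Caps1_ReinaldiRagasa | Caps1_Reinaldi_Ragasa.py | find_extreme
-- ===== SOURCE A (Python) =====
-- def find_extreme(data, column_index, find_max=False):
--     """Find min or max value using bubble sort approach"""
--     if not data:
--         return None
--
--     extreme_value = data[0][column_index]
--     extreme_items = [data[0]]
--
--     for item in data[1:]:
--         current_value = item[column_index]
--         if (find_max and current_value > extreme_value) or (not find_max and current_value < extreme_value):
--             extreme_value = current_value
--             extreme_items = [item]
--         elif current_value == extreme_value:
--             extreme_items.append(item)
--
--     return extreme_value, extreme_items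
-- ===== SOURCE B (Python) =====
-- def find_extreme(data, column_index, find_max=False):
--     """Find min or max value and matching rows via compute-then-filter."""
--     if not data:
--         return None
--     values = [row[column_index] for row in data]
--     extreme = max(values) if find_max else min(values)
--     return extreme, [row for row in data if row[column_index] == extreme]
-- ===== Notes on version B (the rewrite author's own statement) =====
-- stated objective: simpler
-- what changed: Replaces the running-best accumulation with reset/append branching by a compute-then-filter decomposition: one max/min over the column values, then a comprehension keeping rows that attain it.
import Mathlib
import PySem

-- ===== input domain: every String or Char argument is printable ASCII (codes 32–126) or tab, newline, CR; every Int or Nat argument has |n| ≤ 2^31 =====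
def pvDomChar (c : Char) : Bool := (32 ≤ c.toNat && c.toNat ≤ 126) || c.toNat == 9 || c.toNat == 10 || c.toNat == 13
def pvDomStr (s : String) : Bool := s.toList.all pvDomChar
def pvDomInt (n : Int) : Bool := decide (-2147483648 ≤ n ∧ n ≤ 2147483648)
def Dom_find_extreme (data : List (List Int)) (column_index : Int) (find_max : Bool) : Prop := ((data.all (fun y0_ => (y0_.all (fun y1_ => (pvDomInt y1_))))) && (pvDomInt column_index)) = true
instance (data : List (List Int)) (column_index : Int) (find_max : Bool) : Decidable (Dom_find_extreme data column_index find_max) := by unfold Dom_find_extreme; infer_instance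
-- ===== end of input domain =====

-- B replaces A's running-best accumulation by a compute-then-filter decomposition (simpler).

-- ===== PORT A =====
-- one loop iteration of A's running-best accumulation (none = IndexError propagated)
def stepA (ci : Int) (fm : Bool) (st : Option (Int × List (List Int))) (item : List Int) :
    Option (Int × List (List Int)) :=
  st.bind fun p =>
    (PySem.List.pyGet? item ci).map fun cv =>
      if (fm && decide (p.1 < cv)) || (!fm && decide (cv < p.1)) then (cv, [item])
      else if cv = p.1 then (p.1, p.2 ++ [item]) else (p.1, p.2)

def find_extreme (data : List (List Int)) (column_index : Int) (find_max : Bool) :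
    Option (Int × List (List Int)) :=
  match data with
  | [] => none
  | d0 :: rest =>
    (PySem.List.pyGet? d0 column_index).bind fun v0 =>
      rest.foldl (stepA column_index find_max) (some (v0, [d0]))

-- ===== PORT B =====
def find_extreme_alt (data : List (List Int)) (column_index : Int) (find_max : Bool) :
    Option (Int × List (List Int)) :=
  match data with
  | [] => none
  | _ :: _ =>
    (data.mapM (fun row => PySem.List.pyGet? row column_index)).bind fun vals =>
      (if find_max then PySem.List.max? vals (fun v => v)
       else PySem.List.min? vals (fun v => v)).map fun extreme =>
        (extreme, data.filter (fun row => PySem.List.pyGet? row column_index == some extreme))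

-- ===== PRECONDITION & SPEC =====
-- A (and B) raise IndexError when some row lacks the column; Pre_ excludes exactly those inputs.
def Pre_find_extreme (data : List (List Int)) (column_index : Int) (find_max : Bool) : Prop :=
  ∀ r ∈ data, PySem.Raise.InRange r.length column_index
instance (data : List (List Int)) (column_index : Int) (find_max : Bool) :
    Decidable (Pre_find_extreme data column_index find_max) := by
  unfold Pre_find_extreme; infer_instance

def pvWitness_find_extreme : List (List Int) × Int × Bool := ([[1, 2], [3, 1], [0, 2]], 1, true)

def Spec_find_extreme (data : List (List Int)) (column_index : Int) (find_max : Bool) (out : Option (Int × List (List Int))) : Prop := out = find_extreme_alt data column_index find_max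
instance (data : List (List Int)) (column_index : Int) (find_max : Bool) (out : Option (Int × List (List Int))) : Decidable (Spec_find_extreme data column_index find_max out) := by unfold Spec_find_extreme; infer_instance

-- ===== CLAIM (what is proved, stated in full; the proofs are below) =====
def Claim_equal_find_extreme : Prop := ∀ (data : List (List Int)) (column_index : Int) (find_max : Bool), Dom_find_extreme data column_index find_max → Pre_find_extreme data column_index find_max → Spec_find_extreme data column_index find_max (find_extreme data column_index find_max)

-- ===== LEMMAS AND PROOFS =====

-- the column value of a row (total form; used only under Pre_)
def colv (ci : Int) (r : List Int) : Int := (PySem.List.pyGet? r ci).getD 0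

-- A's running extreme over a list, starting from ev
def vfold (fm : Bool) (ci : Int) (ev : Int) (l : List (List Int)) : Int :=
  l.foldl (fun a r => if fm then max a (colv ci r) else min a (colv ci r)) ev

lemma vfold_nil (fm : Bool) (ci ev : Int) : vfold fm ci ev [] = ev := rfl

lemma vfold_cons (fm : Bool) (ci ev : Int) (r : List Int) (t : List (List Int)) :
    vfold fm ci ev (r :: t)
      = vfold fm ci (if fm then max ev (colv ci r) else min ev (colv ci r)) t := rfl

lemma vfold_le (ci ev : Int) (l : List (List Int)) : ev ≤ vfold true ci ev l := by
  induction l generalizing ev with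
  | nil => simp [vfold_nil]
  | cons r t ih =>
    rw [vfold_cons]
    exact le_trans (by simp) (ih _)

lemma le_vfold (ci ev : Int) (l : List (List Int)) : vfold false ci ev l ≤ ev := by
  induction l generalizing ev with
  | nil => simp [vfold_nil]
  | cons r t ih =>
    rw [vfold_cons]
    exact le_trans (ih _) (by simp)

lemma pyGet?_eq_colv {ci : Int} {r : List Int}
    (h : PySem.Raise.InRange r.length ci) :
    PySem.List.pyGet? r ci = some (colv ci r) := by
  have : PySem.List.pyGet? r ci ≠ none := fun hn =>
    ((PySem.List.pyGet?_eq_none_iff r ci).mp hn) h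
  cases hv : PySem.List.pyGet? r ci with
  | none => exact absurd hv this
  | some v => simp [colv, hv]

lemma loopA (fm : Bool) (ci : Int) (l : List (List Int)) (ev : Int) (acc : List (List Int))
    (h : ∀ r ∈ l, PySem.Raise.InRange r.length ci) :
    l.foldl (stepA ci fm) (some (ev, acc)) =
      some (vfold fm ci ev l,
        (if vfold fm ci ev l = ev then acc else []) ++
          l.filter (fun r => PySem.List.pyGet? r ci == some (vfold fm ci ev l))) := by
  induction l generalizing ev acc with
  | nil => simp [vfold_nil]
  | cons r t ih =>
    have hr := pyGet?_eq_colv (h r (by simp))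
    have ht : ∀ x ∈ t, PySem.Raise.InRange x.length ci := fun x hx => h x (by simp [hx])
    set v := colv ci r with hv
    rw [List.foldl_cons]
    have hstep : stepA ci fm (some (ev, acc)) r =
        some (if (fm && decide (ev < v)) || (!fm && decide (v < ev)) then (v, [r])
              else if v = ev then (ev, acc ++ [r]) else (ev, acc)) := by
      simp only [stepA, Option.bind_some, hr, Option.map_some]
    rw [hstep]
    by_cases hb : ((fm && decide (ev < v)) || (!fm && decide (v < ev))) = true
    · -- strictly better: reset
      rw [if_pos hb, ih v [r] ht]
      have hE : vfold fm ci ev (r :: t) = vfold fm ci v t := by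
        rw [vfold_cons, ← hv]
        cases fm
        · simp at hb; simp [min_eq_right hb.le]
        · simp at hb; simp [max_eq_right hb.le]
      have hne : vfold fm ci v t ≠ ev := by
        cases fm
        · have := le_vfold ci v t; simp at hb; omega
        · have := vfold_le ci v t; simp at hb; omega
      rw [hE, if_neg hne, List.nil_append, List.filter_cons]
      by_cases hveq : v = vfold fm ci v t
      · simp [hr, ← hveq]
      · have h2 : ¬ (vfold fm ci v t = v) := fun hh => hveq hh.symm
        simp [hr, hveq, h2]
    · rw [if_neg hb]
      have hE : vfold fm ci ev (r :: t) = vfold fm ci ev t := by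
        rw [vfold_cons, ← hv]
        cases fm
        · simp at hb; simp [min_eq_left hb]
        · simp at hb; simp [max_eq_left hb]
      by_cases hvev : v = ev
      · rw [if_pos hvev, ih ev (acc ++ [r]) ht, hE, List.filter_cons]
        by_cases hEe : vfold fm ci ev t = ev
        · simp [hr, hvev, hEe]
        · have : ¬ (v = vfold fm ci ev t) := by
            rw [hvev]; exact fun hh => hEe hh.symm
          simp [hr, this, hEe]
      · rw [if_neg hvev, ih ev acc ht, hE, List.filter_cons]
        have hvne : v ≠ vfold fm ci ev t := by
          cases fm
          · have := le_vfold ci ev t; simp at hb; omega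
          · have := vfold_le ci ev t; simp at hb; omega
        simp [hr, hvne]

lemma mapM_colv (ci : Int) (l : List (List Int))
    (h : ∀ r ∈ l, PySem.Raise.InRange r.length ci) :
    l.mapM (fun r => PySem.List.pyGet? r ci) = some (l.map (colv ci)) := by
  induction l with
  | nil => rfl
  | cons r t ih =>
    have hr := pyGet?_eq_colv (h r (by simp))
    have ht : ∀ x ∈ t, PySem.Raise.InRange x.length ci := fun x hx => h x (by simp [hx])
    simp [List.mapM_cons, hr, ih ht]

-- ===== VERDICT (by name: the statement is the Claim_ definition above) =====
theorem find_extreme_spec : Claim_equal_find_extreme := by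
  intro data ci fm _ hpre
  unfold Spec_find_extreme
  cases data with
  | nil => rfl
  | cons d0 rest =>
    have h0 := pyGet?_eq_colv (hpre d0 (by simp))
    have hrest : ∀ x ∈ rest, PySem.Raise.InRange x.length ci :=
      fun x hx => hpre x (by simp [hx])
    rw [find_extreme, find_extreme_alt, h0, Option.bind_some,
        mapM_colv ci (d0 :: rest) hpre, Option.bind_some,
        loopA fm ci rest (colv ci d0) [d0] hrest]
    have hmax : (if fm then PySem.List.max? ((d0 :: rest).map (colv ci)) (fun v => v)
                 else PySem.List.min? ((d0 :: rest).map (colv ci)) (fun v => v))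
        = some (vfold fm ci (colv ci d0) rest) := by
      cases fm
      · simp [PySem.List.min?_id_cons, vfold, List.foldl_map]
      · simp [PySem.List.max?_id_cons, vfold, List.foldl_map]
    rw [hmax, Option.map_some]
    congr 1
    set E := vfold fm ci (colv ci d0) rest with hE
    rw [List.filter_cons]
    by_cases h1 : E = colv ci d0
    · simp [h0, ← h1]
    · have : ¬ (colv ci d0 = E) := fun hh => h1 hh.symm
      simp [h0, if_neg h1, this]
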